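-- pv_equiv track=rewrite | github.com/3DV5/MapTopology | MapTopologia/topology_builder.py | _calculate_layout
-- ===== SOURCE A (Python) =====
-- def _calculate_layout(devices, width, height):
--     """Calcula posições dos dispositivos"""
--     positions = []
--     num_devices = len(devices)
--
--     if num_devices == 0:
--         return positions
--
--     # Calcula grid
--     cols = min(3, num_devices)
--     rows = (num_devices + cols - 1) // cols
--
--     for i, device in enumerate(devices):
--         row = i // cols
--         col = i % cols
--
--         # Calcula posição com margens
--         margin_x = 100
--         margin_y = 80
--         spacing_x = (width - 2 * margin_x) // max(1, cols - 1)
--         spacing_y = (height - 2 * margin_y) // max(1, rows - 1)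
--
--         x = margin_x + col * spacing_x
--         y = margin_y + row * spacing_y
--
--         positions.append((x, y, device))
--
--     return positions
-- ===== SOURCE B (Python) =====
-- def _calculate_layout(devices, width, height):
--     n = len(devices)
--     if n == 0:
--         return []
--     cols = min(3, n)
--     rows = (n + cols - 1) // cols
--     spacing_x = (width - 200) // max(1, cols - 1)
--     spacing_y = (height - 160) // max(1, rows - 1)
--     positions = []
--     idx = 0
--     for row in range(rows):
--         y = 80 + row * spacing_y
--         for col in range(cols):
--             if idx == n:
--                 return positions
--             positions.append((100 + col * spacing_x, y, devices[idx]))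
--             idx += 1
--     return positions
-- ===== Notes on version B (the rewrite author's own statement) =====
-- stated objective: alternative
-- what changed: B hoists cols/rows and both integer-division spacings out of the loop (A recomputes them for every device) and replaces A's single enumerate pass with per-index div/mod by a nested row/column grid traversal carrying a running index that stops early on the partial last row.
import Mathlib
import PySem

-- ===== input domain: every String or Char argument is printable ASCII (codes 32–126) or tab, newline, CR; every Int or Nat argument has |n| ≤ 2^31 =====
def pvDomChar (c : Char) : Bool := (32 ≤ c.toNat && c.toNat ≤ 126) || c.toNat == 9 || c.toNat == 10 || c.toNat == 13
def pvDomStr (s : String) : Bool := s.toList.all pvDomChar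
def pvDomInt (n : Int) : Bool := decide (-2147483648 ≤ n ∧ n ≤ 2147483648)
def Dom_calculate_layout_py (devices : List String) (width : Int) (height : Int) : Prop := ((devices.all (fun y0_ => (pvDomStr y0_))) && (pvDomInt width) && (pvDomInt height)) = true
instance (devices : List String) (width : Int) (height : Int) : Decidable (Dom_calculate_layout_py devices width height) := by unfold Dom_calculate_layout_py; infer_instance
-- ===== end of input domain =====

-- B replaces A's single enumerate pass (per-device div/mod index arithmetic, spacings
-- recomputed inside the loop) with hoisted grid parameters and a nested row/column
-- traversal carrying a running index; objective: alternative decomposition.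


-- ===== PORT A =====
-- literal transliteration of _calculate_layout: enumerate loop, per-item div/mod,
-- margins/spacings recomputed on every iteration
def calculate_layout_py (devices : List String) (width : Int) (height : Int) : List (Int × Int × String) :=
  let positions : List (Int × Int × String) := []
  let num_devices : Int := (devices.length : Int)
  if num_devices == 0 then positions
  else
    let cols : Int := min 3 num_devices
    let rows : Int := PySem.Int.floordiv (num_devices + cols - 1) cols
    (PySem.List.enumerate devices 0).foldl (fun acc p =>
      let row : Int := PySem.Int.floordiv p.1 cols
      let col : Int := PySem.Int.mod p.1 cols
      let margin_x : Int := 100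
      let margin_y : Int := 80
      let spacing_x : Int := PySem.Int.floordiv (width - 2 * margin_x) (max 1 (cols - 1))
      let spacing_y : Int := PySem.Int.floordiv (height - 2 * margin_y) (max 1 (rows - 1))
      let x := margin_x + col * spacing_x
      let y := margin_y + row * spacing_y
      acc ++ [(x, y, p.2)]) positions

-- ===== PORT B =====
-- inner column loop: count of remaining cells in the row, current col, running idx;
-- returns (positions, stopped-early?).  devices.getD idx "" is devices[idx]: B only
-- reads it when idx < len(devices), so the default is never used.
def pvInnerB (devices : List String) (sx : Int) (y : Int) (n : Nat) :
    Nat → Nat → Nat → List (Int × Int × String) → List (Int × Int × String) × Bool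
  | 0, _, _, acc => (acc, false)
  | k + 1, col, idx, acc =>
    if idx = n then (acc, true)
    else pvInnerB devices sx y n k (col + 1) (idx + 1)
      (acc ++ [(100 + (col : Int) * sx, y, devices.getD idx "")])

-- outer row loop: count of remaining rows, current row, running idx
def pvOuterB (devices : List String) (sx sy : Int) (cols n : Nat) :
    Nat → Nat → Nat → List (Int × Int × String) → List (Int × Int × String)
  | 0, _, _, acc => acc
  | k + 1, row, idx, acc =>
    let y : Int := 80 + (row : Int) * sy
    let r := pvInnerB devices sx y n cols 0 idx acc
    if r.2 then r.1
    else pvOuterB devices sx sy cols n k (row + 1) (idx + cols) r.1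

def calculate_layout_py_alt (devices : List String) (width : Int) (height : Int) : List (Int × Int × String) :=
  let n := devices.length
  if n = 0 then []
  else
    let cols := min 3 n
    let rows := (n + cols - 1) / cols
    let sx := PySem.Int.floordiv (width - 200) (max 1 ((cols : Int) - 1))
    let sy := PySem.Int.floordiv (height - 160) (max 1 ((rows : Int) - 1))
    pvOuterB devices sx sy cols n rows 0 0 []

-- ===== PRECONDITION & SPEC =====
def Spec_calculate_layout_py (devices : List String) (width : Int) (height : Int) (out : List (Int × Int × String)) : Prop := out = calculate_layout_py_alt devices width height
instance (devices : List String) (width : Int) (height : Int) (out : List (Int × Int × String)) : Decidable (Spec_calculate_layout_py devices width height out) := by unfold Spec_calculate_layout_py; infer_instance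

-- ===== CLAIM (what is proved, stated in full; the proofs are below) =====
def Claim_equal_calculate_layout_py : Prop := ∀ (devices : List String) (width : Int) (height : Int), Dom_calculate_layout_py devices width height → Spec_calculate_layout_py devices width height (calculate_layout_py devices width height)

-- ===== LEMMAS AND PROOFS =====

-- the common normal form: cell i of the grid
def pvCell (devices : List String) (sx sy : Int) (cols i : Nat) : Int × Int × String :=
  (100 + ((i % cols : Nat) : Int) * sx, 80 + ((i / cols : Nat) : Int) * sy, devices.getD i "")

lemma pvInnerB_eq (devices : List String) (sx y : Int) (n : Nat) :
    ∀ (k col idx : Nat) (acc : List (Int × Int × String)), idx ≤ n →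
      pvInnerB devices sx y n k col idx acc =
        (acc ++ (List.range (min k (n - idx))).map
            (fun j => (100 + ((col + j : Nat) : Int) * sx, y, devices.getD (idx + j) "")),
         decide (n < idx + k)) := by
  intro k
  induction k with
  | zero => intro col idx acc h; simp [pvInnerB]; omega
  | succ k ih =>
    intro col idx acc h
    by_cases hidx : idx = n
    · subst hidx
      simp [pvInnerB]
    · have hlt : idx < n := lt_of_le_of_ne h hidx
      have : min (k + 1) (n - idx) = min k (n - idx - 1) + 1 := by omega
      rw [pvInnerB, if_neg hidx, ih _ _ _ (by omega), this, List.range_succ_eq_map]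
      have hn : n - (idx + 1) = n - idx - 1 := by omega
      have hf : (fun j => ((100 + ((col + 1 + j : Nat) : Int) * sx, y, devices.getD (idx + 1 + j) "") : Int × Int × String))
          = (fun j => ((100 + ((col + j : Nat) : Int) * sx, y, devices.getD (idx + j) "") : Int × Int × String)) ∘ Nat.succ := by
        funext j
        have h1 : col + 1 + j = col + (j + 1) := by omega
        have h2 : idx + 1 + j = idx + (j + 1) := by omega
        simp [Function.comp, h1, h2]
      rw [hn, hf]
      simp only [Prod.mk.injEq]
      refine ⟨?_, ?_⟩
      · simp [List.append_assoc]
      · simp only [decide_eq_decide]; omega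

lemma pvOuterB_eq (devices : List String) (sx sy : Int) (cols n : Nat) (hc : 0 < cols) :
    ∀ (k row : Nat) (acc : List (Int × Int × String)),
      row * cols ≤ n → n ≤ (row + k) * cols →
      pvOuterB devices sx sy cols n k row (row * cols) acc =
        acc ++ (List.range (n - row * cols)).map (fun j => pvCell devices sx sy cols (row * cols + j)) := by
  intro k
  induction k with
  | zero => intro row acc h1 h2; simp at h2; have : n - row * cols = 0 := by omega
            simp [pvOuterB, this]
  | succ k ih =>
    intro row acc h1 h2
    rw [pvOuterB]
    rw [pvInnerB_eq devices sx _ n cols 0 (row * cols) acc h1]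
    by_cases hfull : row * cols + cols ≤ n
    · -- full row, no early stop
      have hstop : decide (n < row * cols + cols) = false := by simp; omega
      have hmin : min cols (n - row * cols) = cols := by omega
      simp only [hstop, hmin]
      rw [if_neg (by simp)]
      have e1 : (row + 1) * cols = row * cols + cols := by ring
      have e2 : (row + 1 + k) * cols = (row + (k + 1)) * cols := by ring
      have hrec := ih (row + 1) (acc ++ (List.range cols).map
            (fun j => (100 + ((0 + j : Nat) : Int) * sx, 80 + (row : Int) * sy, devices.getD (row * cols + j) "")))
            (by omega ) (by omega)
      have hidx : row * cols + cols = (row + 1) * cols := by ring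
      rw [hidx] at *
      rw [hrec, List.append_assoc]
      congr 1
      have hsplit : n - row * cols = cols + (n - (row + 1) * cols) := by
        have : (row+1) * cols = row * cols + cols := by ring
        omega
      rw [hsplit, List.range_add, List.map_append, List.map_map]
      congr 1
      · apply List.map_congr_left
        intro j hj
        simp only [List.mem_range] at hj
        unfold pvCell
        have hmod : (row * cols + j) % cols = j := by
          rw [Nat.add_comm, Nat.add_mul_mod_self_right]; exact Nat.mod_eq_of_lt hj
        have hdiv : (row * cols + j) / cols = row := by
          rw [Nat.add_comm, Nat.add_mul_div_right _ _ hc, Nat.div_eq_of_lt hj]; omega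
        rw [hmod, hdiv]
        simp
      · apply List.map_congr_left
        intro j hj
        simp only [Function.comp]
        congr 1
        have : (row + 1) * cols = row * cols + cols := by ring
        omega
    · -- partial (or empty-tail) last row: inner loop stops at idx = n
      have hstop : decide (n < row * cols + cols) = true := by simp; omega
      have hmin : min cols (n - row * cols) = n - row * cols := by omega
      simp only [hstop, hmin]
      rw [if_pos (by simp)]
      congr 1
      apply List.map_congr_left
      intro j hj
      simp only [List.mem_range] at hj
      unfold pvCell
      have hjlt : j < cols := by omega
      have hmod : (row * cols + j) % cols = j := by
        rw [Nat.add_comm, Nat.add_mul_mod_self_right]; exact Nat.mod_eq_of_lt hjlt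
      have hdiv : (row * cols + j) / cols = row := by
        rw [Nat.add_comm, Nat.add_mul_div_right _ _ hc, Nat.div_eq_of_lt hjlt]; omega
      rw [hmod, hdiv]
      simp

lemma ceil_mul_ge (n c : Nat) (hc : 0 < c) : n ≤ (n + c - 1) / c * c := by
  have h := Nat.div_add_mod (n + c - 1) c
  have h2 := Nat.mod_lt (n + c - 1) hc
  have e : c * ((n + c - 1) / c) = (n + c - 1) / c * c := by ring
  omega

-- A as a map over range n of the common cell function
lemma calcA_eq_map (devices : List String) (width height : Int) (h : devices ≠ []) :
    calculate_layout_py devices width height =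
      (List.range devices.length).map
        (fun i => pvCell devices
          (PySem.Int.floordiv (width - 200) (max 1 (((min 3 devices.length : Nat) : Int) - 1)))
          (PySem.Int.floordiv (height - 160) (max 1 ((((devices.length + min 3 devices.length - 1) / min 3 devices.length : Nat) : Int) - 1)))
          (min 3 devices.length) i) := by
  have hn : devices.length ≠ 0 := by simpa using h
  have hcols : (min 3 ((devices.length : Nat) : Int)) = ((min 3 devices.length : Nat) : Int) := by
    push_cast; rfl
  have hrows : PySem.Int.floordiv ((devices.length : Int) + ((min 3 devices.length : Nat) : Int) - 1) ((min 3 devices.length : Nat) : Int)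
      = (((devices.length + min 3 devices.length - 1) / min 3 devices.length : Nat) : Int) := by
    have e : ((devices.length : Int) + ((min 3 devices.length : Nat) : Int) - 1)
        = (((devices.length + min 3 devices.length - 1 : Nat)) : Int) := by
      have : 1 ≤ devices.length + min 3 devices.length := by omega
      push_cast [this]; ring
    rw [e, PySem.Int.floordiv_natCast]
  unfold calculate_layout_py
  rw [if_neg (by simp [hn])]
  rw [PySem.List.foldl_append_singleton_eq_map]
  simp only [List.nil_append]
  apply List.ext_getElem
  · simp [PySem.List.length_enumerate]
  · intro k h1 h2
    simp only [List.getElem_map, List.getElem_range, PySem.List.getElem_enumerate]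
    have hk : k < devices.length := by
      simpa [PySem.List.length_enumerate] using h1
    simp only [hcols, hrows]
    unfold pvCell
    simp only [Int.zero_add, Prod.mk.injEq]
    refine ⟨?_, ?_, ?_⟩
    · rw [show (width - 2 * 100 : Int) = width - 200 by ring, PySem.Int.mod_natCast]
    · rw [show (height - 2 * 80 : Int) = height - 160 by ring, PySem.Int.floordiv_natCast]
    · rw [List.getD_eq_getElem?_getD, List.getElem?_eq_getElem hk, Option.getD_some]

-- ===== VERDICT (by name: the statement is the Claim_ definition above) =====
theorem calculate_layout_py_spec : Claim_equal_calculate_layout_py := by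
  intro devices width height _
  unfold Spec_calculate_layout_py
  by_cases hdev : devices = []
  · subst hdev
    simp [calculate_layout_py, calculate_layout_py_alt]
  · have hn : devices.length ≠ 0 := by simpa using hdev
    rw [calcA_eq_map devices width height hdev]
    unfold calculate_layout_py_alt
    rw [if_neg hn]
    have hc : 0 < min 3 devices.length := by omega
    have hle := ceil_mul_ge devices.length (min 3 devices.length) hc
    have hout := pvOuterB_eq devices
        (PySem.Int.floordiv (width - 200) (max 1 (((min 3 devices.length : Nat) : Int) - 1)))
        (PySem.Int.floordiv (height - 160) (max 1 ((((devices.length + min 3 devices.length - 1) / min 3 devices.length : Nat) : Int) - 1)))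
        (min 3 devices.length) devices.length hc
        ((devices.length + min 3 devices.length - 1) / min 3 devices.length) 0 []
        (by simp) (by simpa using hle)
    simp only [Nat.zero_mul, Nat.zero_add, Nat.sub_zero, List.nil_append] at hout
    rw [hout]
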